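-- pv_equiv track=rewrite | github.com/TanviMehra/Python-Codes | Arrays,Strings/String Minimization.py | minString
-- ===== SOURCE A (Python) =====
-- def minString(s):
--     left=0
--     right= len(s)-1
--     while left< right and s[left]==s[right]:
--         char= s[left]
--         while left<=right and s[left]==char:
--             left=left+1
--         while left<right and s[right]==char:
--             right=right-1
--     return right-left+1
-- ===== SOURCE B (Python) =====
-- def minString(s):
--     # Recursive strip: if the ends match, drop all copies of that char from both
--     # ends and recurse; a segment consisting only of that char collapses to 0.
--     if len(s) < 2 or s[0] != s[-1]:
--         return len(s)
--     c = s[0]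
--     t = s.lstrip(c)
--     if not t:
--         return 0
--     return minString(t.rstrip(c))
-- ===== Notes on version B (the rewrite author's own statement) =====
-- stated objective: simpler
-- what changed: A's iterative two-index scan with three nested while loops is replaced by a short recursive strip: if the first and last characters match, lstrip/rstrip that character off both ends and recurse, collapsing an all-one-character remainder to 0.
import Mathlib
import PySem

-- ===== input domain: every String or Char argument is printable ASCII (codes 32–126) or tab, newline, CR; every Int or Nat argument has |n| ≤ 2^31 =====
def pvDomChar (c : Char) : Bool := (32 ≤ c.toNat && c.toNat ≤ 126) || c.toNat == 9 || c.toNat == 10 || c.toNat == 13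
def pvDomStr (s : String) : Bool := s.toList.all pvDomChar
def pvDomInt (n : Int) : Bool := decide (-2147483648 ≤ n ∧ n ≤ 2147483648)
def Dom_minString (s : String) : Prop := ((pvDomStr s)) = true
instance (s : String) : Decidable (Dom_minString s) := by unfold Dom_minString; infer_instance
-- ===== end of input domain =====

-- B replaces A's iterative two-index scan (three nested while loops) by a short
-- recursive strip of matching end characters (objective: simpler; same cost).


-- ===== PORT A =====
-- measure facts cited by the ports' decreasing_by proofs (kept as named
-- theorems so the definitions' bodies stay small)
theorem pvDec1 (left right : Int) (h : left ≤ right) :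
    (right + 1 - (left + 1)).toNat < (right + 1 - left).toNat := by omega

theorem pvDec2 (left right : Int) (h : left < right) :
    (right - 1 - left).toNat < (right - left).toNat := by omega

theorem pvDec3 (l r l' r' : Int) (h1 : l < l') (h2 : r' ≤ r) (h : l < r) :
    (r' - l').toNat < (r - l).toNat := by omega

-- inner loop `while left<=right and s[left]==char: left=left+1`
def aInner1 (cs : List Char) (c : Char) (left right : Int) : Int :=
  if _h : left ≤ right ∧ PySem.List.pyGet? cs left = some c then
    aInner1 cs c (left + 1) right
  else left
termination_by (right + 1 - left).toNat
decreasing_by exact pvDec1 left right _h.1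

-- inner loop `while left<right and s[right]==char: right=right-1`
def aInner2 (cs : List Char) (c : Char) (left right : Int) : Int :=
  if _h : left < right ∧ PySem.List.pyGet? cs right = some c then
    aInner2 cs c left (right - 1)
  else right
termination_by (right - left).toNat
decreasing_by exact pvDec2 left right _h.1

-- bounds cited by aOuter's termination proof
theorem aInner1_lb (cs : List Char) (c : Char) (left right : Int) :
    left ≤ aInner1 cs c left right := by
  fun_induction aInner1 cs c left right with
  | case1 l _h ih => omega
  | case2 l _h => omega

theorem aInner1_gt (cs : List Char) (c : Char) (left right : Int)
    (h1 : left ≤ right) (h2 : PySem.List.pyGet? cs left = some c) :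
    left < aInner1 cs c left right := by
  rw [aInner1]
  simp only [h1, h2, and_self, dite_true]
  have := aInner1_lb cs c (left + 1) right
  omega

theorem aInner2_ub (cs : List Char) (c : Char) (left right : Int) :
    aInner2 cs c left right ≤ right := by
  fun_induction aInner2 cs c left right with
  | case1 r _h ih => omega
  | case2 r _h => omega

-- outer loop `while left<right and s[left]==s[right]`; started from minString
-- both indices are always in range, so the `none` arm is unreachable there.
def aOuter (cs : List Char) (left right : Int) : Int :=
  if h : left < right then
    match hc : PySem.List.pyGet? cs left with
    | some c =>
      if PySem.List.pyGet? cs right = some c then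
        aOuter cs (aInner1 cs c left right)
          (aInner2 cs c (aInner1 cs c left right) right)
      else right - left + 1
    | none => right - left + 1
  else right - left + 1
termination_by (right - left).toNat
decreasing_by
  exact pvDec3 left right (aInner1 cs c left right)
    (aInner2 cs c (aInner1 cs c left right) right)
    (aInner1_gt cs c left right (le_of_lt h) hc)
    (aInner2_ub cs c (aInner1 cs c left right) right) h

def minString (s : String) : Int :=
  aOuter s.toList 0 (PySem.Str.len s - 1)

-- ===== PORT B =====
-- helper cited by bCore's termination proof
theorem rdropWhile_length_le (p : Char → Bool) (l : List Char) :
    (l.rdropWhile p).length ≤ l.length := by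
  simp only [List.rdropWhile, List.length_reverse]
  exact le_trans (List.length_dropWhile_le _ _) (by simp)

theorem pvDec4 (c : Char) (rest : List Char) :
    (((c :: rest).dropWhile (· == c)).rdropWhile (· == c)).length
      < (c :: rest).length := by
  have h1 : (c :: rest).dropWhile (· == c) = rest.dropWhile (· == c) :=
    List.dropWhile_cons_of_pos (by simp)
  have h2 := rdropWhile_length_le (· == c) ((c :: rest).dropWhile (· == c))
  have h3 := List.length_dropWhile_le (· == c) rest
  simp only [h1] at h2 ⊢
  simp only [List.length_cons]
  omega

-- recursive strip; when length ≥ 2 the string is c :: rest with c = s[0], and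
-- `s.lstrip(c)` / `t.rstrip(c)` with the single character c are exactly
-- dropWhile / rdropWhile (· == c); the `[]` arm is unreachable (length ≥ 2).
def bCore (cs : List Char) : Int :=
  if cs.length < 2 then (cs.length : Int)
  else
    match cs with
    | [] => 0
    | c :: rest =>
      if PySem.List.pyGet? (c :: rest) (-1) ≠ some c then ((c :: rest).length : Int)
      else
        if (c :: rest).dropWhile (· == c) = [] then 0
        else bCore (((c :: rest).dropWhile (· == c)).rdropWhile (· == c))
termination_by cs.length
decreasing_by exact pvDec4 c rest

def minString_alt (s : String) : Int := bCore s.toList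

-- ===== PRECONDITION & SPEC =====
def Spec_minString (s : String) (out : Int) : Prop := out = minString_alt s
instance (s : String) (out : Int) : Decidable (Spec_minString s out) := by unfold Spec_minString; infer_instance

-- ===== CLAIM (what is proved, stated in full; the proofs are below) =====
def Claim_equal_minString : Prop := ∀ (s : String), Dom_minString s → Spec_minString s (minString s)

-- ===== LEMMAS AND PROOFS =====

-- the slice of cs from index `left` to index `right` inclusive
def seg (cs : List Char) (left right : Int) : List Char :=
  (cs.drop left.toNat).take (right + 1 - left).toNat

theorem seg_length (cs : List Char) (left right : Int)
    (h0 : 0 ≤ left) (hle : left ≤ right + 1) (hlen : right < (cs.length : Int)) :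
    (seg cs left right).length = (right + 1 - left).toNat := by
  simp only [seg, List.length_take, List.length_drop]
  omega

theorem seg_cons (cs : List Char) (left right : Int)
    (h0 : 0 ≤ left) (hlr : left ≤ right) (_hlen : right < (cs.length : Int))
    (hl : left.toNat < cs.length) :
    seg cs left right = cs[left.toNat] :: seg cs (left + 1) right := by
  simp only [seg]
  rw [List.drop_eq_getElem_cons hl]
  have hm : (right + 1 - left).toNat = (right + 1 - (left + 1)).toNat + 1 := by omega
  rw [hm, List.take_succ_cons]
  have h1 : (left + 1).toNat = left.toNat + 1 := by omega
  rw [h1]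

theorem seg_snoc (cs : List Char) (left right : Int)
    (h0 : 0 ≤ left) (hlr : left ≤ right) (_hlen : right < (cs.length : Int))
    (hr : right.toNat < cs.length) :
    seg cs left right = seg cs left (right - 1) ++ [cs[right.toNat]] := by
  simp only [seg]
  have hm : (right + 1 - left).toNat = (right - 1 + 1 - left).toNat + 1 := by omega
  rw [hm, List.take_add_one, List.getElem?_drop]
  have hidx : left.toNat + (right - 1 + 1 - left).toNat = right.toNat := by omega
  rw [hidx, List.getElem?_eq_getElem hr]
  rfl

-- one-step unfoldings of bCore used by the invariant proof
theorem bCore_small (cs : List Char) (h : cs.length < 2) :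
    bCore cs = (cs.length : Int) := by
  rw [bCore.eq_def]; simp [h]

theorem bCore_step (c : Char) (tl : List Char)
    (h2 : ¬ (c :: tl).length < 2)
    (hlast : (c :: tl).getLast? = some c) :
    bCore (c :: tl) = if (c :: tl).dropWhile (· == c) = [] then 0
      else bCore (((c :: tl).dropWhile (· == c)).rdropWhile (· == c)) := by
  rw [bCore]
  simp only [h2, if_false, PySem.List.pyGet?_neg_one, hlast, ne_eq, not_true_eq_false]

theorem bCore_len (c e : Char) (tl : List Char)
    (h2 : ¬ (c :: tl).length < 2)
    (hlast : (c :: tl).getLast? = some e) (hne : e ≠ c) :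
    bCore (c :: tl) = ((c :: tl).length : Int) := by
  rw [bCore]
  simp only [h2, if_false, PySem.List.pyGet?_neg_one, hlast, ne_eq, Option.some.injEq, hne]
  simp

theorem aInner1_ub (cs : List Char) (c : Char) (left right : Int) :
    left ≤ right + 1 → aInner1 cs c left right ≤ right + 1 := by
  fun_induction aInner1 cs c left right with
  | case1 l hcond ih => intro _; exact ih (by omega)
  | case2 l _h => intro h; omega

theorem aInner2_lb (cs : List Char) (c : Char) (left right : Int) :
    left ≤ right → left ≤ aInner2 cs c left right := by
  fun_induction aInner2 cs c left right with
  | case1 r hcond ih => intro _; exact ih (by omega)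
  | case2 r _h => intro h; omega

-- after inner loop 1, the slice [left', right] is dropWhile (== c) of [left, right]
theorem inner1_seg (cs : List Char) (c : Char) (left right : Int) :
    0 ≤ left → left ≤ right + 1 → right < (cs.length : Int) →
    seg cs (aInner1 cs c left right) right = (seg cs left right).dropWhile (· == c) := by
  fun_induction aInner1 cs c left right with
  | case1 l hcond ih =>
    intro h0 hle hlen
    obtain ⟨hlr, hg⟩ := hcond
    have hl : l.toNat < cs.length := by omega
    rw [PySem.List.pyGet?_of_nonneg cs h0] at hg
    simp only [List.getElem?_eq_getElem hl, Option.some.injEq] at hg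
    have hcons : seg cs l right = c :: seg cs (l + 1) right := by
      rw [seg_cons cs l right h0 hlr hlen hl, hg]
    rw [hcons, List.dropWhile_cons_of_pos (by simp)]
    exact ih (by omega) (by omega) hlen
  | case2 l hcond =>
    intro h0 hle hlen
    by_cases hlr : l ≤ right
    · have hl : l.toNat < cs.length := by omega
      have hg : PySem.List.pyGet? cs l ≠ some c := fun h => hcond ⟨hlr, h⟩
      rw [PySem.List.pyGet?_of_nonneg cs h0, List.getElem?_eq_getElem hl] at hg
      have hne : cs[l.toNat] ≠ c := fun h => hg (by rw [h])
      rw [seg_cons cs l right h0 hlr hlen hl,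
        List.dropWhile_cons_of_neg (by simpa using hne)]
    · have hnil : seg cs l right = [] := by
        have h1 := seg_length cs l right h0 hle hlen
        have h2 : (seg cs l right).length = 0 := by omega
        exact List.length_eq_zero_iff.mp h2
      rw [hnil]
      rfl

-- after inner loop 2 the slice [left, right'] is rdropWhile (== c) of [left, right],
-- provided cs[left] ≠ c (true after inner loop 1 when the remainder is nonempty)
theorem inner2_seg (cs : List Char) (c : Char) (left : Int)
    (h0 : 0 ≤ left) (hl : left.toNat < cs.length)
    (hd : (cs[left.toNat] == c) = false) (right : Int) :
    left ≤ right → right < (cs.length : Int) →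
    seg cs left (aInner2 cs c left right) = (seg cs left right).rdropWhile (· == c) := by
  fun_induction aInner2 cs c left right with
  | case1 r hcond ih =>
    intro hlr hlen
    obtain ⟨hlr', hg⟩ := hcond
    have hr : r.toNat < cs.length := by omega
    rw [PySem.List.pyGet?_of_nonneg cs (by omega)] at hg
    simp only [List.getElem?_eq_getElem hr, Option.some.injEq] at hg
    have hsnoc : seg cs left r = seg cs left (r - 1) ++ [c] := by
      rw [seg_snoc cs left r h0 hlr hlen hr, hg]
    rw [hsnoc, List.rdropWhile_concat_pos _ _ _ (by simp)]
    exact ih (by omega) (by omega)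
  | case2 r hcond =>
    intro hlr hlen
    by_cases hlr' : left < r
    · have hr : r.toNat < cs.length := by omega
      have hg : PySem.List.pyGet? cs r ≠ some c := fun h => hcond ⟨hlr', h⟩
      rw [PySem.List.pyGet?_of_nonneg cs (by omega), List.getElem?_eq_getElem hr] at hg
      have hne : cs[r.toNat] ≠ c := fun h => hg (by rw [h])
      rw [seg_snoc cs left r h0 hlr hlen hr,
        List.rdropWhile_concat_neg _ _ _ (by simpa using hne)]
    · -- left = r : the slice is the single char cs[left] ≠ c
      have hrl : left = r := by omega
      subst hrl
      have hnil : seg cs (left + 1) left = [] := by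
        have h1 := seg_length cs (left + 1) left (by omega) (by omega) hlen
        have h2 : (seg cs (left + 1) left).length = 0 := by omega
        exact List.length_eq_zero_iff.mp h2
      have hseg : seg cs left left = [cs[left.toNat]] := by
        rw [seg_cons cs left left h0 (le_refl left) hlen hl, hnil]
      rw [hseg, show [cs[left.toNat]] = ([] : List Char) ++ [cs[left.toNat]] from rfl,
        List.rdropWhile_concat_neg _ _ _ (by simp [hd])]

-- main loop invariant: the outer loop on [left, right] computes bCore of the slice
theorem aOuter_eq_bCore (cs : List Char) (left right : Int) :
    0 ≤ left → right < (cs.length : Int) → left ≤ right + 1 →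
    aOuter cs left right = bCore (seg cs left right) := by
  fun_induction aOuter cs left right with
  | case1 l r hlr c hc hr ih =>
    intro h0 hlen hle
    -- branch: left < right and s[left] == s[right] == c
    have hl' : l.toNat < cs.length := by omega
    have hr' : r.toNat < cs.length := by omega
    have hgl : cs[l.toNat] = c := by
      rw [PySem.List.pyGet?_of_nonneg cs h0] at hc
      simpa [List.getElem?_eq_getElem hl'] using hc
    have hgr : cs[r.toNat] = c := by
      rw [PySem.List.pyGet?_of_nonneg cs (by omega)] at hr
      simpa [List.getElem?_eq_getElem hr'] using hr
    have hlenseg := seg_length cs l r h0 hle hlen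
    have hcons : seg cs l r = c :: seg cs (l + 1) r := by
      rw [seg_cons cs l r h0 (by omega) hlen hl', hgl]
    have hsnoc : seg cs l r = seg cs l (r - 1) ++ [c] := by
      rw [seg_snoc cs l r h0 (by omega) hlen hr', hgr]
    have hlast : (seg cs l r).getLast? = some c := by
      rw [hsnoc]; exact List.getLast?_concat
    have hB : bCore (seg cs l r) =
        if (seg cs l r).dropWhile (· == c) = [] then 0
        else bCore (((seg cs l r).dropWhile (· == c)).rdropWhile (· == c)) := by
      rw [hcons]
      exact bCore_step c (seg cs (l + 1) r) (by rw [← hcons]; omega)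
        (by rw [← hcons]; exact hlast)
    have hI1 : seg cs (aInner1 cs c l r) r = (seg cs l r).dropWhile (· == c) :=
      inner1_seg cs c l r h0 hle hlen
    have hb1 : l ≤ aInner1 cs c l r := aInner1_lb cs c l r
    have hb2 : aInner1 cs c l r ≤ r + 1 := aInner1_ub cs c l r (by omega)
    by_cases ht : (seg cs l r).dropWhile (· == c) = []
    · -- the whole slice consists of c's: A returns 0, B returns 0
      have hlen' := seg_length cs (aInner1 cs c l r) r (by omega) (by omega) hlen
      rw [hI1, ht] at hlen'
      simp only [List.length_nil] at hlen'
      have hl'eq : aInner1 cs c l r = r + 1 := by omega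
      have h2 : aInner2 cs c (aInner1 cs c l r) r = r := by
        rw [aInner2, dif_neg (fun h => absurd h.1 (by omega))]
      rw [ih (by omega) (by rw [h2]; omega) (by rw [h2]; omega), h2,
        hI1, ht, hB, if_pos ht, bCore_small [] (by simp)]
      simp
    · -- nonempty remainder whose head differs from c
      have hl'r : aInner1 cs c l r ≤ r := by
        by_contra hcon
        have hlen' := seg_length cs (aInner1 cs c l r) r (by omega) (by omega) hlen
        rw [hI1] at hlen'
        have h2 : ((seg cs l r).dropWhile (· == c)).length = 0 := by omega
        exact ht (List.length_eq_zero_iff.mp h2)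
      have hl'lt : (aInner1 cs c l r).toNat < cs.length := by omega
      have hhd : (cs[(aInner1 cs c l r).toNat] == c) = false := by
        have hcons' := seg_cons cs (aInner1 cs c l r) r (by omega) hl'r hlen hl'lt
        have h5 := List.head?_dropWhile_not (· == c) (seg cs l r)
        rw [← hI1, hcons'] at h5
        simpa using h5
      have hI2 : seg cs (aInner1 cs c l r) (aInner2 cs c (aInner1 cs c l r) r)
          = (seg cs (aInner1 cs c l r) r).rdropWhile (· == c) :=
        inner2_seg cs c (aInner1 cs c l r) (by omega) hl'lt hhd r hl'r hlen
      have hbr1 := aInner2_ub cs c (aInner1 cs c l r) r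
      have hbr2 := aInner2_lb cs c (aInner1 cs c l r) r hl'r
      rw [ih (by omega) (by omega) (by omega), hI2, hI1, hB, if_neg ht]
  | case2 l r hlr c hc hr =>
    intro h0 hlen hle
    -- branch: left < right and s[left] ≠ s[right]: both sides return the length
    have hl' : l.toNat < cs.length := by omega
    have hr' : r.toNat < cs.length := by omega
    have hgl : cs[l.toNat] = c := by
      rw [PySem.List.pyGet?_of_nonneg cs h0] at hc
      simpa [List.getElem?_eq_getElem hl'] using hc
    have hne : cs[r.toNat] ≠ c := by
      rw [PySem.List.pyGet?_of_nonneg cs (by omega), List.getElem?_eq_getElem hr'] at hr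
      exact fun h => hr (by rw [h])
    have hlenseg := seg_length cs l r h0 hle hlen
    have hcons : seg cs l r = c :: seg cs (l + 1) r := by
      rw [seg_cons cs l r h0 (by omega) hlen hl', hgl]
    have hsnoc : seg cs l r = seg cs l (r - 1) ++ [cs[r.toNat]] :=
      seg_snoc cs l r h0 (by omega) hlen hr'
    rw [hcons, bCore_len c cs[r.toNat] (seg cs (l + 1) r) (by rw [← hcons]; omega)
      (by rw [← hcons, hsnoc]; exact List.getLast?_concat) hne, ← hcons]
    omega
  | case3 l r hlr hc =>
    intro h0 hlen hle
    -- branch: left < right but s[left] out of range — impossible here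
    exfalso
    rw [PySem.List.pyGet?_of_nonneg cs h0, List.getElem?_eq_none_iff] at hc
    omega
  | case4 l r hlr =>
    intro h0 hlen hle
    -- branch: left ≥ right: the slice has at most one character
    have hlenseg := seg_length cs l r h0 hle hlen
    rw [bCore_small (seg cs l r) (by omega)]
    omega

-- ===== VERDICT (by name: the statement is the Claim_ definition above) =====
theorem minString_spec : Claim_equal_minString := by
  intro s _
  unfold Spec_minString minString minString_alt
  rw [PySem.Str.len_eq]
  rw [aOuter_eq_bCore s.toList 0 ((s.toList.length : Int) - 1)
    (by omega) (by omega) (by omega)]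
  congr 1
  simp [seg]
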